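-- pv_equiv track=rewrite | github.com/rdisho20/ls-core | py119/practice_problems_2/study_xtra1b.py | segment_rotate
-- ===== SOURCE A (Python) =====
-- def rotate_numbers(numbers):
--     first = numbers.pop(0)
--     numbers.append(first)
--
--     return numbers
--
-- def segment_rotate(num_lst, segments):
--     result = []
--     first_segment_length = len(num_lst) % segments
--
--     if len(num_lst) % segments != 0:
--         new_lst = []
--
--         for idx in range(first_segment_length):
--             new_lst.append(num_lst[idx])
--
--         result = result + rotate_numbers(new_lst)
--
--     if len(num_lst) < segments:
--         return result
--
--     for idx in range(first_segment_length, len(num_lst), segments):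
--         new_lst = []
--         new_lst.extend(num_lst[idx:idx + segments])
--         result = result + rotate_numbers(new_lst)
--
--     return result
-- ===== SOURCE B (Python) =====
-- def segment_rotate(num_lst, segments):
--     n = len(num_lst)
--     r = n % segments  # ZeroDivisionError preserved for segments == 0
--     out = []
--     for i in range(n):
--         if i < r:
--             s, L = 0, r
--         else:
--             s, L = r + (i - r) // segments * segments, segments
--         out.append(num_lst[s + (i - s + 1) % L])
--     return out
-- ===== Notes on version B (the rewrite author's own statement) =====
-- stated objective: alternative
-- what changed: Replaces per-segment slicing plus pop(0)/append rotation and repeated list concatenation with a single flat pass over output indices that computes each element's source position by modular arithmetic.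
-- outside the precondition, e.g. on segment_rotate([1, 2, 3, 4, 5, 6], -3): A returns [], B raises IndexError
import Mathlib
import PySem

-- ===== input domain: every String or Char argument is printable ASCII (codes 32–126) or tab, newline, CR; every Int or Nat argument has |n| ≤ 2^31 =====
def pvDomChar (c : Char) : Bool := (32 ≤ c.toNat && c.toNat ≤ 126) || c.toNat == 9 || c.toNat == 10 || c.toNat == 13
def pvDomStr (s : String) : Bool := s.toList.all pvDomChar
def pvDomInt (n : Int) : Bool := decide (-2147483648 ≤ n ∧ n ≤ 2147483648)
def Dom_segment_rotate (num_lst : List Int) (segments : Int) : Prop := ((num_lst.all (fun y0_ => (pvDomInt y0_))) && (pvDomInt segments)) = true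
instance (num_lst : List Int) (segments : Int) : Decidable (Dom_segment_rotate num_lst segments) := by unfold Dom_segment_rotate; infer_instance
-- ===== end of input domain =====

-- B builds the result in one flat pass, computing each output element's source index by
-- modular arithmetic, instead of A's per-segment slicing + pop(0)/append rotation with
-- repeated list concatenation; equivalence is proved for segments ≥ 1 (return values only;
-- neither program mutates its caller-visible argument).

-- ===== PORT A =====
-- numbers.pop(0); numbers.append(first): on [] Python raises IndexError (unreachable under Pre_)
def rotate_numbers (numbers : List Int) : List Int :=
  match numbers with
  | [] => []           -- Python: IndexError here; excluded by Pre_segment_rotate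
  | first :: rest => rest ++ [first]

def segment_rotate (num_lst : List Int) (segments : Int) : List Int :=
  let result : List Int := []
  let first_segment_length := PySem.Int.mod (num_lst.length : Int) segments
  let result :=
    if PySem.Int.mod (num_lst.length : Int) segments ≠ 0 then
      let new_lst := (PySem.List.pyRange 0 first_segment_length 1).foldl
        (fun acc idx => acc ++ [PySem.List.pyGetD num_lst idx 0]) []
      result ++ rotate_numbers new_lst
    else result
  if (num_lst.length : Int) < segments then result
  else
    (PySem.List.pyRange first_segment_length (num_lst.length : Int) segments).foldl
      (fun res idx => res ++ rotate_numbers (PySem.List.slice num_lst (some idx) (some (idx + segments))))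
      result

-- ===== PORT B =====
def segment_rotate_alt (num_lst : List Int) (segments : Int) : List Int :=
  let n : Int := num_lst.length
  let r := PySem.Int.mod n segments
  (PySem.List.pyRange 0 n 1).foldl
    (fun out i =>
      let s := if i < r then 0 else r + PySem.Int.floordiv (i - r) segments * segments
      let L := if i < r then r else segments
      out ++ [PySem.List.pyGetD num_lst (s + PySem.Int.mod (i - s + 1) L) 0])
    []

-- ===== PRECONDITION & SPEC =====
-- Pre_ restricts to the task's natural domain, a positive segment size: for segments == 0
-- Python A raises ZeroDivisionError, and for segments < 0 A raises IndexError (popping an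
-- empty list) except when segments happens to divide a positive length, where it returns []
-- by accident of its loop bounds; B's own algorithm raises there too.
def Pre_segment_rotate (num_lst : List Int) (segments : Int) : Prop := 1 ≤ segments
instance (num_lst : List Int) (segments : Int) : Decidable (Pre_segment_rotate num_lst segments) := by
  unfold Pre_segment_rotate; infer_instance

def pvWitness_segment_rotate : List Int × Int := ([1, 2, 3, 4, 5, 6, 7, 8], 3)

def Spec_segment_rotate (num_lst : List Int) (segments : Int) (out : List Int) : Prop :=
  out = segment_rotate_alt num_lst segments
instance (num_lst : List Int) (segments : Int) (out : List Int) : Decidable (Spec_segment_rotate num_lst segments out) := by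
  unfold Spec_segment_rotate; infer_instance

-- ===== CLAIM (what is proved, stated in full; the proofs are below) =====
def Claim_equal_segment_rotate : Prop :=
  ∀ (num_lst : List Int) (segments : Int), Dom_segment_rotate num_lst segments →
    Pre_segment_rotate num_lst segments →
    Spec_segment_rotate num_lst segments (segment_rotate num_lst segments)

-- ===== LEMMAS AND PROOFS =====

-- B's per-index source function (proof-only abbreviation of B's loop body)
def gB (xs : List Int) (m r i : Int) : Int :=
  let s := if i < r then 0 else r + PySem.Int.floordiv (i - r) m * m
  let L := if i < r then r else m
  PySem.List.pyGetD xs (s + PySem.Int.mod (i - s + 1) L) 0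

lemma ceil_succ (c m : Int) (hm : 0 < m) :
    (c + m - 1) / m = (c - 1) / m + 1 := by
  have : c + m - 1 = (c - 1) + 1 * m := by ring
  rw [this, Int.add_mul_ediv_right _ _ hm.ne']

lemma pyRange_pos_nil {a b m : Int} (hm : 0 < m) (h : b ≤ a) :
    PySem.List.pyRange a b m = [] := by
  simp [PySem.List.pyRange, hm.ne', hm, not_lt.2 h]

lemma pyRange_pos_cons {a b m : Int} (hm : 0 < m) (hab : a < b) :
    PySem.List.pyRange a b m = a :: PySem.List.pyRange (a + m) b m := by
  simp only [PySem.List.pyRange, if_neg hm.ne', if_pos hm, if_pos hab]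
  by_cases h2 : a + m < b
  · rw [if_pos h2]
    have hN : ((b - a + m - 1) / m).toNat = ((b - (a + m) + m - 1) / m).toNat + 1 := by
      have e1 : b - a + m - 1 = (b - a) + m - 1 := by ring
      have e2 : b - (a + m) + m - 1 = (b - a) - 1 := by ring
      rw [e1, e2, ceil_succ _ _ hm]
      have h0 : 0 ≤ ((b - a) - 1) / m := Int.ediv_nonneg (by omega) hm.le
      omega
    rw [hN, List.range_succ_eq_map]
    simp only [List.map_cons, List.map_map]
    refine List.cons_eq_cons.mpr ⟨by ring_nf, ?_⟩
    refine List.map_congr_left (fun k _ => ?_)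
    simp only [Function.comp_apply, Nat.succ_eq_add_one]
    push_cast
    ring
  · rw [if_neg h2]
    have hN : ((b - a + m - 1) / m).toNat = 1 := by
      have : (b - a + m - 1) / m = 1 := by
        rw [← PySem.Int.floordiv_eq_ediv_of_pos hm, PySem.Int.floordiv_eq_iff_of_pos hm]
        constructor <;> nlinarith
      omega
    rw [hN]
    simp

lemma rot_map (h : Int → Int) (a L : Int) (hL : 0 < L) :
    rotate_numbers ((PySem.List.pyRange a (a + L) 1).map h)
      = (PySem.List.pyRange a (a + L) 1).map (fun i => h (a + PySem.Int.mod (i - a + 1) L)) := by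
  conv_lhs => rw [PySem.List.pyRange_one_cons (by omega)]
  have hsplit : PySem.List.pyRange a (a + L) 1
      = PySem.List.pyRange a (a + L - 1) 1 ++ [a + L - 1] := by
    rw [show a + L = (a + L - 1) + 1 by ring, PySem.List.pyRange_one_succ_right (by omega)]
    norm_num
  conv_rhs => rw [hsplit]
  simp only [List.map_cons, List.map_append, rotate_numbers]
  have hlast : h (a + PySem.Int.mod (a + L - 1 - a + 1) L) = h a := by
    have : a + L - 1 - a + 1 = L := by ring
    rw [this, PySem.Int.mod_eq_emod_of_pos hL, Int.emod_self, add_zero]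
  rw [hlast]
  refine congrArg (· ++ [h a]) ?_
  rw [PySem.List.pyRange_one a (a + L - 1), PySem.List.pyRange_one (a + 1) (a + L)]
  have he : (a + L - 1 - a).toNat = (a + L - (a + 1)).toNat := by omega
  rw [List.map_map, List.map_map, he]
  refine List.map_congr_left (fun k hk => ?_)
  simp only [List.mem_range] at hk
  simp only [Function.comp_apply]
  have hklt : (k : Int) < L - 1 := by omega
  have hmod : PySem.Int.mod (a + (k : Int) - a + 1) L = (k : Int) + 1 := by
    rw [PySem.Int.mod_eq_emod_of_pos hL]
    have : a + (k : Int) - a + 1 = (k : Int) + 1 := by ring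
    rw [this, Int.emod_eq_of_lt (by omega) (by omega)]
  rw [hmod]
  ring_nf

lemma chunk_map (xs : List Int) (a m : Int) (h0 : 0 ≤ a) (hm : 0 < m)
    (hle : a + m ≤ (xs.length : Int)) :
    PySem.List.slice xs (some a) (some (a + m))
      = (PySem.List.pyRange a (a + m) 1).map (fun i => PySem.List.pyGetD xs i 0) := by
  have hdrop := PySem.List.map_pyGetD_pyRange xs 0 h0
  rw [PySem.List.len_eq] at hdrop
  have hsplit : PySem.List.pyRange a (xs.length : Int) 1
      = PySem.List.pyRange a (a + m) 1 ++ PySem.List.pyRange (a + m) (xs.length : Int) 1 :=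
    PySem.List.pyRange_one_append _ _ _ (by omega) hle
  rw [hsplit, List.map_append] at hdrop
  have hlen : ((PySem.List.pyRange a (a + m) 1).map (fun j => PySem.List.pyGetD xs j 0)).length
      = m.toNat := by
    rw [List.length_map, PySem.List.length_pyRange_one]; omega
  rw [PySem.List.slice_toNat xs h0 (by omega)]
  have : m.toNat = (a + m).toNat - a.toNat := by omega
  rw [← this, ← hdrop, ← hlen]
  exact List.take_left

lemma first_map (xs : List Int) (m r : Int) (hrpos : 0 < r) :
    rotate_numbers ((PySem.List.pyRange 0 r 1).foldl
        (fun acc idx => acc ++ [PySem.List.pyGetD xs idx 0]) [])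
      = (PySem.List.pyRange 0 r 1).map (gB xs m r) := by
  rw [PySem.List.foldl_append_singleton_eq_map (fun idx => PySem.List.pyGetD xs idx 0) _ [],
    List.nil_append]
  have h := rot_map (fun i => PySem.List.pyGetD xs i 0) 0 r hrpos
  rw [zero_add] at h
  rw [h]
  refine List.map_congr_left (fun i hi => ?_)
  rw [PySem.List.mem_pyRange_one] at hi
  simp [gB, hi.2]

lemma main_loop (xs : List Int) (m r : Int) (hm : 0 < m)
    (hr : r = PySem.Int.mod (xs.length : Int) m) :
    ∀ (k : Nat) (a : Int) (acc : List Int), ((xs.length : Int) - a).toNat = k →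
      r ≤ a → m ∣ a - r → a ≤ (xs.length : Int) →
      (PySem.List.pyRange a (xs.length : Int) m).foldl
        (fun res idx => res ++ rotate_numbers (PySem.List.slice xs (some idx) (some (idx + m)))) acc
      = acc ++ (PySem.List.pyRange a (xs.length : Int) 1).map (gB xs m r) := by
  intro k
  induction k using Nat.strong_induction_on with
  | _ k ih =>
    intro a acc hk hra hdvd han
    by_cases hend : (xs.length : Int) ≤ a
    · rw [pyRange_pos_nil hm hend, PySem.List.pyRange_one_eq_nil hend]; simp
    · rw [not_le] at hend
      obtain ⟨q, hq⟩ := hdvd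
      rw [mul_comm] at hq
      have hrnn : 0 ≤ r := by
        rw [hr, PySem.Int.mod_eq_emod_of_pos hm]
        exact Int.emod_nonneg _ hm.ne'
      have hlr : m ∣ (xs.length : Int) - r := by
        rw [hr, PySem.Int.mod_eq_emod_of_pos hm]
        exact ⟨(xs.length : Int) / m, by linarith [Int.emod_add_mul_ediv (xs.length : Int) m]⟩
      have hla : m ∣ (xs.length : Int) - a := by
        have : (xs.length : Int) - a = ((xs.length : Int) - r) - (a - r) := by ring
        rw [this, hq]
        exact dvd_sub hlr ⟨q, mul_comm q m⟩
      have hfull : a + m ≤ (xs.length : Int) := by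
        have := Int.le_of_dvd (by omega) hla
        omega
      rw [pyRange_pos_cons hm hend]
      simp only [List.foldl_cons]
      rw [ih (((xs.length : Int) - (a + m)).toNat) (by omega) (a + m) _ rfl (by omega)
        ⟨q + 1, by linarith [hq]⟩ (by omega)]
      rw [chunk_map xs a m (by omega) hm hfull,
        rot_map (fun i => PySem.List.pyGetD xs i 0) a m hm]
      have hcongr : (PySem.List.pyRange a (a + m) 1).map
          (fun i => PySem.List.pyGetD xs (a + PySem.Int.mod (i - a + 1) m) 0)
          = (PySem.List.pyRange a (a + m) 1).map (gB xs m r) := by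
        refine List.map_congr_left (fun i hi => ?_)
        rw [PySem.List.mem_pyRange_one] at hi
        have hir : ¬ i < r := by omega
        have hdiv : PySem.Int.floordiv (i - r) m = q := by
          rw [PySem.Int.floordiv_eq_iff_of_pos hm]
          constructor
          · linarith [hi.1, hq]
          · have : (q + 1) * m = q * m + m := by ring
            linarith [hi.2, hq, this]
        have hs : r + PySem.Int.floordiv (i - r) m * m = a := by
          rw [hdiv]; linarith [hq]
        simp only [gB, if_neg hir, hs]
      rw [hcongr,
        PySem.List.pyRange_one_append a (a + m) (xs.length : Int) (by omega) hfull,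
        List.map_append, List.append_assoc]

lemma segment_rotate_eq_alt (xs : List Int) (m : Int) (hpre : 1 ≤ m) :
    segment_rotate xs m = segment_rotate_alt xs m := by
  have hm : 0 < m := hpre
  have hemod : PySem.Int.mod (xs.length : Int) m = (xs.length : Int) % m :=
    PySem.Int.mod_eq_emod_of_pos hm
  have hnn : (0 : Int) ≤ (xs.length : Int) := by positivity
  have hrnn : 0 ≤ PySem.Int.mod (xs.length : Int) m := by
    rw [hemod]; exact Int.emod_nonneg _ hm.ne'
  have hrn : PySem.Int.mod (xs.length : Int) m ≤ (xs.length : Int) := by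
    rw [hemod]
    rcases lt_or_ge (xs.length : Int) m with h | h
    · rw [Int.emod_eq_of_lt hnn h]
    · have := Int.emod_lt_of_pos (xs.length : Int) hm; omega
  have hB : segment_rotate_alt xs m
      = (PySem.List.pyRange 0 (xs.length : Int) 1).map
          (gB xs m (PySem.Int.mod (xs.length : Int) m)) :=
    (PySem.List.foldl_append_singleton_eq_map _ _ _).trans (List.nil_append _)
  have hfirst : (if PySem.Int.mod (xs.length : Int) m ≠ 0 then
        ([] : List Int) ++ rotate_numbers ((PySem.List.pyRange 0 (PySem.Int.mod (xs.length : Int) m) 1).foldl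
          (fun acc idx => acc ++ [PySem.List.pyGetD xs idx 0]) [])
      else []) = (PySem.List.pyRange 0 (PySem.Int.mod (xs.length : Int) m) 1).map
        (gB xs m (PySem.Int.mod (xs.length : Int) m)) := by
    by_cases h0 : PySem.Int.mod (xs.length : Int) m = 0
    · rw [if_neg (by simp [h0]), h0, PySem.List.pyRange_one_eq_nil le_rfl, List.map_nil]
    · rw [if_pos h0, List.nil_append, first_map xs m _ (by omega)]
  rw [hB]
  simp only [segment_rotate]
  by_cases hlt : (xs.length : Int) < m
  · rw [if_pos hlt, hfirst]
    have heq : PySem.Int.mod (xs.length : Int) m = (xs.length : Int) := by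
      rw [hemod]; exact Int.emod_eq_of_lt hnn hlt
    rw [heq]
  · rw [if_neg hlt,
      main_loop xs m _ hm rfl _ _ _ rfl le_rfl ⟨0, by ring⟩ hrn,
      hfirst, ← List.map_append,
      ← PySem.List.pyRange_one_append 0 _ _ hrnn hrn]

-- ===== VERDICT (by name: the statement is the Claim_ definition above) =====
theorem segment_rotate_spec : Claim_equal_segment_rotate := by
  intro num_lst segments _ hpre
  exact segment_rotate_eq_alt num_lst segments hpre
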